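-- pv_equiv track=rewrite | github.com/trix98/GLC | src/glc/ground_truth_validation.py | _get_box_positions
-- ===== SOURCE A (Python) =====
-- from typing import Dict, List, Tuple, Optional
-- from typing import List, Tuple, Optional, Union
--
-- def _get_box_positions(class_labels: List[str], plot_all: bool) -> Tuple[List[int], List[int]]:
--     count, delta = 0, 0
--     running_code = ""
--     start_pos: List[int] = []
--     stop_pos: List[int] = []
--
--     for lab in class_labels:
--         try:
--             code = lab.split("[")[1][2:4]
--             if code != running_code:
--                 running_code = code
--                 start_pos.append(count - delta)
--                 stop_pos.append(count)
--                 delta = 0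
--         except Exception:
--             start_pos.append(count - delta)
--             stop_pos.append(count)
--             break
--
--         count += 1
--         delta += 1
--
--     if plot_all:
--         start_pos.append(count - delta)
--         stop_pos.append(count)
--
--     return start_pos, stop_pos
-- ===== SOURCE B (Python) =====
-- from typing import List, Tuple
--
--
-- def _get_box_positions(class_labels: List[str], plot_all: bool) -> Tuple[List[int], List[int]]:
--     # Pass 1: decode each label's code, stopping at the first label without "[".
--     codes: List[str] = []
--     failed = False
--     for lab in class_labels:
--         parts = lab.split("[")
--         if len(parts) < 2:
--             failed = True
--             break
--         codes.append(parts[1][2:4])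
--
--     # Pass 2: scan the codes, emitting a boundary whenever the code changes.
--     start_pos: List[int] = []
--     stop_pos: List[int] = []
--     prev = ""
--     seg_start = 0
--     for i, c in enumerate(codes):
--         if c != prev:
--             start_pos.append(seg_start)
--             stop_pos.append(i)
--             seg_start = i
--             prev = c
--
--     n = len(codes)
--     if failed:
--         start_pos.append(seg_start)
--         stop_pos.append(n)
--     if plot_all:
--         start_pos.append(seg_start)
--         stop_pos.append(n)
--     return start_pos, stop_pos
-- ===== Notes on version B (the rewrite author's own statement) =====
-- stated objective: simpler
-- what changed: A's single loop with count/delta counters and try/except is replaced by two plain passes: decode all codes first (stopping at the first unparsable label), then scan the code list for changes while tracking the segment start index directly.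
import Mathlib
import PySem

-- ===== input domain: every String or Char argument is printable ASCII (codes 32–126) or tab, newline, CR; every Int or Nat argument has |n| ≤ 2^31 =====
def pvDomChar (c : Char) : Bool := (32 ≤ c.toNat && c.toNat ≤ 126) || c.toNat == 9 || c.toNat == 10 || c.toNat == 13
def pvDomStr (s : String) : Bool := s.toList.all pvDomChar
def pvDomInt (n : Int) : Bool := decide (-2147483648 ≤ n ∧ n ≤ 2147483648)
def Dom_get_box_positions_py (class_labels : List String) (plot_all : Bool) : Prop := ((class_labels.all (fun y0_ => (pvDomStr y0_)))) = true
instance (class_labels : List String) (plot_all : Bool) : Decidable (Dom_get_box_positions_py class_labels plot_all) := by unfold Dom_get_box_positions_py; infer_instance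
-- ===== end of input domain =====

-- B replaces A's single loop with counters (count/delta, try/except) by two passes — decode the
-- codes once, then scan for changes tracking the segment start — objective: simpler decomposition.

-- ===== PORT A =====
-- code = lab.split("[")[1][2:4]; none exactly where Python raises (no "[" in lab)
def pvCodeA? (lab : String) : Option String :=
  match PySem.List.pyGet? ((PySem.Str.split? lab "[").getD []) 1 with
  | none => none
  | some piece => some (PySem.Str.slice piece (some 2) (some 4))

-- A's for-loop with break: state (count, delta, running_code, start_pos, stop_pos);
-- returns (start_pos, stop_pos, count, delta) as they stand when the loop ends (break or exhaustion).
def pvLoopA (labs : List String) (count delta : Int) (running : String)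
    (sp st : List Int) : List Int × List Int × Int × Int :=
  match labs with
  | [] => (sp, st, count, delta)
  | lab :: rest =>
    match pvCodeA? lab with
    | none => (sp ++ [count - delta], st ++ [count], count, delta)   -- except: append, break
    | some code =>
      if code ≠ running then
        pvLoopA rest (count + 1) (0 + 1) code (sp ++ [count - delta]) (st ++ [count])
      else
        pvLoopA rest (count + 1) (delta + 1) running sp st

def get_box_positions_py (class_labels : List String) (plot_all : Bool) : List Int × List Int :=
  let r := pvLoopA class_labels 0 0 "" [] []
  if plot_all then (r.1 ++ [r.2.2.1 - r.2.2.2], r.2.1 ++ [r.2.2.1]) else (r.1, r.2.1)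

-- ===== PORT B =====
-- Pass 1: decode each label's code, stopping at the first label without "[" (failed flag).
def pvDecodeB (labs : List String) : List String × Bool :=
  match labs with
  | [] => ([], false)
  | lab :: rest =>
    let parts := (PySem.Str.split? lab "[").getD []
    if parts.length < 2 then ([], true)
    else
      let code := PySem.Str.slice (parts.getD 1 "") (some 2) (some 4)
      let r := pvDecodeB rest
      (code :: r.1, r.2)

-- Pass 2: emit a boundary (seg_start, i) whenever the code changes; returns (start_pos, stop_pos, seg_start).
def pvScanB (codes : List String) (i : Int) (prev : String) (seg : Int)
    (sp st : List Int) : List Int × List Int × Int :=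
  match codes with
  | [] => (sp, st, seg)
  | c :: rest =>
    if c ≠ prev then pvScanB rest (i + 1) c i (sp ++ [seg]) (st ++ [i])
    else pvScanB rest (i + 1) prev seg sp st

def get_box_positions_py_alt (class_labels : List String) (plot_all : Bool) : List Int × List Int :=
  let d := pvDecodeB class_labels
  let s := pvScanB d.1 0 "" 0 [] []
  let n : Int := d.1.length
  let sp := if d.2 then s.1 ++ [s.2.2] else s.1
  let st := if d.2 then s.2.1 ++ [n] else s.2.1
  if plot_all then (sp ++ [s.2.2], st ++ [n]) else (sp, st)

-- ===== PRECONDITION & SPEC =====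
def Spec_get_box_positions_py (class_labels : List String) (plot_all : Bool) (out : List Int × List Int) : Prop := out = get_box_positions_py_alt class_labels plot_all
instance (class_labels : List String) (plot_all : Bool) (out : List Int × List Int) : Decidable (Spec_get_box_positions_py class_labels plot_all out) := by unfold Spec_get_box_positions_py; infer_instance

-- ===== CLAIM (what is proved, stated in full; the proofs are below) =====
def Claim_equal_get_box_positions_py : Prop := ∀ (class_labels : List String) (plot_all : Bool), Dom_get_box_positions_py class_labels plot_all → Spec_get_box_positions_py class_labels plot_all (get_box_positions_py class_labels plot_all)

-- ===== LEMMAS AND PROOFS =====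

-- A's per-label decode agrees with B's length-guarded decode.
theorem pvCodeA?_eq (lab : String) :
    pvCodeA? lab =
      (if ((PySem.Str.split? lab "[").getD []).length < 2 then none
       else some (PySem.Str.slice (((PySem.Str.split? lab "[").getD []).getD 1 "") (some 2) (some 4))) := by
  unfold pvCodeA?
  rcases h : (PySem.Str.split? lab "[").getD [] with _ | ⟨x, _ | ⟨y, rest⟩⟩ <;>
    simp [PySem.List.pyGet?, PySem.List.pyIdx?]

-- The single loop of A equals B's decode-then-scan composition, for any starting state
-- (seg_start is count - delta; the returned count/delta are recovered from the boundary n and seg).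
theorem loop_eq (labs : List String) : ∀ (count delta : Int) (running : String)
    (sp st : List Int),
    pvLoopA labs count delta running sp st =
      (let d := pvDecodeB labs
       let s := pvScanB d.1 count running (count - delta) sp st
       let n : Int := count + d.1.length
       if d.2 then (s.1 ++ [s.2.2], s.2.1 ++ [n], n, n - s.2.2)
       else (s.1, s.2.1, n, n - s.2.2)) := by
  induction labs with
  | nil =>
    intro count delta running sp st
    simp [pvLoopA, pvDecodeB, pvScanB]
  | cons lab rest ih =>
    intro count delta running sp st
    simp only [pvLoopA, pvDecodeB, pvCodeA?_eq]
    by_cases hp : ((PySem.Str.split? lab "[").getD []).length < 2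
    · simp only [hp, if_pos]
      simp [pvScanB]
    · simp only [hp, if_false]
      set code := PySem.Str.slice (((PySem.Str.split? lab "[").getD []).getD 1 "") (some 2) (some 4) with hc
      by_cases hne : code ≠ running
      · simp only [if_pos hne]
        rw [ih]
        simp only [pvScanB, if_pos hne]
        have : count + 1 - (0 + 1) = count := by omega
        rw [this]
        rcases hd : pvDecodeB rest with ⟨codes, failed⟩
        cases failed <;> simp <;> omega
      · simp only [if_neg hne]
        rw [ih]
        simp only [pvScanB, if_neg hne]
        have : count + 1 - (delta + 1) = count - delta := by omega
        rw [this]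
        rcases hd : pvDecodeB rest with ⟨codes, failed⟩
        cases failed <;> simp <;> omega

-- ===== VERDICT (by name: the statement is the Claim_ definition above) =====
theorem get_box_positions_py_spec : Claim_equal_get_box_positions_py := by
  intro class_labels plot_all _
  unfold Spec_get_box_positions_py get_box_positions_py get_box_positions_py_alt
  rw [loop_eq]
  simp only []
  rcases hd : pvDecodeB class_labels with ⟨codes, failed⟩
  rcases hs : pvScanB codes 0 "" (0 - 0) [] [] with ⟨sp, st, seg⟩
  have h0 : (0 : Int) - 0 = 0 := by norm_num
  rw [h0] at hs
  cases failed <;> cases plot_all <;> simp [hs]
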